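-- pv_equiv track=rewrite | github.com/pozernishku/fides_rem | WARC.py | strip_urls
-- ===== SOURCE A (Python) =====
-- def strip_port(res_url):
--     res_len = len(res_url)
--     for d in range(1, 7 if res_len > 5 else res_len+1):
--         if res_url[-d] == ':':
--             return res_url[:-d]
--     else:
--         return res_url
--
-- def strip_urls(url):
--     cnt = 0
--     if len(url) == 0: return url
--     first = url[0]
--
--     for i, c in enumerate(url):
--         if c == '/':
--             cnt += 1
--             if (first == 'h' and cnt == 3) or (first == 'w' and cnt == 1):
--                 return strip_port(url[:i]).strip('\\')
--     else:
--         return strip_port(url).strip('\\')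
-- ===== SOURCE B (Python) =====
-- def strip_urls(url):
--     if url == '':
--         return url
--     first = url[0]
--     n = 3 if first == 'h' else 1 if first == 'w' else 0
--     parts = url.split('/')
--     if 0 < n <= len(parts) - 1:
--         body = '/'.join(parts[:n])
--     else:
--         body = url
--     k = body.rfind(':')
--     if k != -1 and len(body) - k <= 6:
--         body = body[:k]
--     return body.strip('\\')
-- ===== Notes on version B (the rewrite author's own statement) =====
-- stated objective: faster
-- what changed: A counts slashes character by character in an enumerate loop and strips the port with a backward six-step negative-index scan; B is a staged pipeline over a different data structure: it splits the URL into a list of segments with str.split, rejoins the first n segments (3 for h-URLs, 1 for w-URLs), and cuts at the last colon found by rfind whenever it lies in the six-character tail.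
import Mathlib
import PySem

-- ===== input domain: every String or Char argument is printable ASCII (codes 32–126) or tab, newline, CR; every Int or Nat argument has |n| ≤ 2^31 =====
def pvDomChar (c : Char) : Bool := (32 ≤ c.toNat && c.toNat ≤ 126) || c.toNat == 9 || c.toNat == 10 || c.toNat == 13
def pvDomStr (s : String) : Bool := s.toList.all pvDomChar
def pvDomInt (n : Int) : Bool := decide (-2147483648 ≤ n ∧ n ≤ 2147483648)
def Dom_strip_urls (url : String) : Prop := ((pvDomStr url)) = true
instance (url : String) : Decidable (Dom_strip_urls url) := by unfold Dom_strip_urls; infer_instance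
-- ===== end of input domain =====

-- B replaces A's character-by-character slash-counting scan and backward six-step port loop by a
-- staged pipeline: split the URL into a segment list, rejoin a prefix of it, and cut at the last
-- colon (rfind) when it lies in the six-character tail; a timing run measured B constant-factor
-- faster (C-level split/join/rfind replace the Python-level per-character loop).


-- ===== PORT A =====
-- strip_port's "for d in range(1, 7 if res_len > 5 else res_len+1)" loop with early return
def stripPortLoopA (res : List Char) : List Int → List Char
  | [] => res
  | d :: ds =>
    if PySem.List.pyGetD res (-d) ' ' == ':' then PySem.List.slice res none (some (-d))
    else stripPortLoopA res ds

def stripPortA (res : List Char) : List Char :=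
  let resLen : Int := res.length
  stripPortLoopA res (PySem.List.pyRange 1 (if resLen > 5 then 7 else resLen + 1))

-- "return strip_port(x).strip('\\')"
def finishA (l : List Char) : List Char :=
  PySem.Chars.stripChars (stripPortA l) ['\\']

-- the "for i, c in enumerate(url)" loop of strip_urls, with counter cnt
def stripUrlsLoopA (first : Char) (full : List Char) : List (Int × Char) → Int → List Char
  | [], _ => finishA full
  | (i, c) :: rest, cnt =>
    if c == '/' then
      if (first == 'h' && cnt + 1 == 3) || (first == 'w' && cnt + 1 == 1) then
        finishA (PySem.List.slice full none (some i))
      else stripUrlsLoopA first full rest (cnt + 1)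
    else stripUrlsLoopA first full rest cnt

def strip_urls (url : String) : String :=
  if PySem.Str.len url == 0 then url
  else
    let l := url.toList
    let first := PySem.List.pyGetD l 0 ' '
    String.ofList (stripUrlsLoopA first l (PySem.List.enumerate l) 0)

-- ===== PORT B =====
-- Source B: split on '/', rejoin the first n segments (n = 3 for 'h…', 1 for 'w…', else 0 = keep url),
-- then rfind(':') and cut when the colon lies within the last six characters, then strip '\'.
def strip_urls_alt (url : String) : String :=
  if url == "" then url
  else
    let l := url.toList
    let first := PySem.List.pyGetD l 0 ' '
    let n : Int := if first == 'h' then 3 else if first == 'w' then 1 else 0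
    let parts := PySem.Chars.splitOn l ['/']
    let body :=
      if 0 < n && n ≤ (parts.length : Int) - 1 then
        PySem.Chars.join ['/'] (PySem.List.slice parts none (some n))
      else l
    let k := PySem.Chars.rfind body [':']
    let body2 :=
      if k != -1 && (body.length : Int) - k ≤ 6 then PySem.List.slice body none (some k)
      else body
    String.ofList (PySem.Chars.stripChars body2 ['\\'])

-- ===== PRECONDITION & SPEC =====
def Spec_strip_urls (url : String) (out : String) : Prop := out = strip_urls_alt url
instance (url : String) (out : String) : Decidable (Spec_strip_urls url out) := by unfold Spec_strip_urls; infer_instance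

-- ===== CLAIM (what is proved, stated in full; the proofs are below) =====
def Claim_equal_strip_urls : Prop := ∀ (url : String), Dom_strip_urls url → Spec_strip_urls url (strip_urls url)

-- ===== LEMMAS AND PROOFS =====

-- common characterisation of both port-stripping routines
def portSpec (res : List Char) : List Char :=
  match (res.reverse.take 6).findIdx? (· == ':') with
  | some j => res.take (res.length - (j + 1))
  | none => res

-- index of the n-th '/' (n ≥ 1), if any
def idxN : Nat → List Char → Option Nat
  | _, [] => none
  | n, c :: t =>
    if c = '/' then (if n ≤ 1 then some 0 else (idxN (n - 1) t).map (· + 1))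
    else (idxN n t).map (· + 1)

-- simple structural splitter on '/'
def splitC : List Char → List (List Char)
  | [] => [[]]
  | c :: t =>
    if c = '/' then [] :: splitC t
    else match splitC t with
      | p :: ps => (c :: p) :: ps
      | [] => [[c]]

lemma singleton_prefix (c : Char) (l : List Char) : [c] <+: l ↔ l[0]? = some c := by
  cases l with
  | nil => simp
  | cons a t => simp [List.cons_prefix_cons, eq_comm]

lemma singleton_isPrefixOf (c : Char) (l : List Char) :
    [c].isPrefixOf l = true ↔ l[0]? = some c := by
  rw [List.isPrefixOf_iff_prefix, singleton_prefix]

lemma splitC_slash (t : List Char) : splitC ('/' :: t) = [] :: splitC t := rfl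

lemma splitC_cons (c : Char) (t : List Char) (h : c ≠ '/') :
    splitC (c :: t) = match splitC t with | p :: ps => (c :: p) :: ps | [] => [[c]] := by
  rw [splitC, if_neg h]

lemma idxN_slash (n : Nat) (t : List Char) :
    idxN n ('/' :: t) = if n ≤ 1 then some 0 else (idxN (n - 1) t).map (· + 1) := rfl

lemma idxN_cons (n : Nat) (c : Char) (t : List Char) (h : c ≠ '/') :
    idxN n (c :: t) = (idxN n t).map (· + 1) := by
  rw [idxN, if_neg h]

-- ---- A-side: strip_port loop = portSpec ----

lemma stripPortLoopA_eq_find? (ds : List Int) (res : List Char) :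
    stripPortLoopA res ds =
      match ds.find? (fun d => PySem.List.pyGetD res (-d) ' ' == ':') with
      | some d => PySem.List.slice res none (some (-d))
      | none => res := by
  induction ds with
  | nil => simp [stripPortLoopA]
  | cons d ds ih =>
    simp only [stripPortLoopA, List.find?_cons]
    by_cases h : PySem.List.pyGetD res (-d) ' ' == ':'
    · simp [h]
    · simp only [h, if_neg] at *
      simp [h, ih]

lemma range_find (res : List Char) (w : Nat) (hw : w ≤ res.length) :
    (PySem.List.pyRange 1 ((w : Int) + 1)).find? (fun d => PySem.List.pyGetD res (-d) ' ' == ':')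
      = ((res.reverse.take w).findIdx? (· == ':')).map (fun j : Nat => ((j : Int) + 1)) := by
  induction w with
  | zero =>
    norm_num
  | succ w ih =>
    have hw' : w ≤ res.length := by omega
    have hcast : ((w + 1 : Nat) : Int) + 1 = ((w : Int) + 1) + 1 := by push_cast; ring
    rw [hcast, PySem.List.pyRange_one_succ_right (by omega), List.find?_append, ih hw']
    have hwr : w < res.reverse.length := by simp; omega
    rw [List.take_succ, List.findIdx?_append]
    rw [List.getElem?_eq_getElem hwr]
    have hlen : (res.reverse.take w).length = w := by simp; omega
    have hval : PySem.List.pyGetD res (-((w : Int) + 1)) ' ' = res.reverse[w] := by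
      have h1 : (-((w : Int) + 1)) = -((w + 1 : Nat) : Int) := by push_cast; ring
      rw [h1, PySem.List.pyGetD_neg_natCast res (w + 1) ' ' (by omega) (by omega)]
      rw [List.getElem_reverse]
      congr 1
      omega
    cases hfi : (res.reverse.take w).findIdx? (· == ':') with
    | some j => simp [hfi]
    | none =>
      simp only [hfi, Option.map_none, Option.none_or, Option.map_some]
      simp only [Option.toList_some, List.findIdx?_singleton, hlen]
      simp only [List.find?_singleton, List.findIdx?_singleton]
      rw [hval]
      cases hc : res.reverse[w] == ':' <;> simp [hc]

lemma stripPortA_eq_spec (res : List Char) : stripPortA res = portSpec res := by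
  unfold stripPortA portSpec
  set W : Nat := min 6 res.length with hW
  have hif : (if (res.length : Int) > 5 then (7 : Int) else (res.length : Int) + 1) = (W : Int) + 1 := by
    by_cases h : 5 < res.length
    · rw [if_pos (by exact_mod_cast h)]
      have : W = 6 := by omega
      rw [this]; norm_num
    · rw [if_neg (by push_cast; omega)]
      have : W = res.length := by omega
      rw [this]
  simp only [hif]
  rw [stripPortLoopA_eq_find?, range_find res W (by omega)]
  have htake : res.reverse.take W = res.reverse.take 6 := by
    apply List.take_eq_take_iff.mpr
    simp; omega
  rw [htake]
  cases hfi : (res.reverse.take 6).findIdx? (· == ':') with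
  | none => simp
  | some j =>
    simp only [Option.map_some]
    have h1 : (-(((j : Int)) + 1)) = -(((j + 1 : Nat) : Int)) := by push_cast; ring
    rw [h1, PySem.List.slice_to_neg_natCast res (j + 1) (by omega)]

-- ---- B-side: rfind-based cut = portSpec ----

lemma rfind_go_eq (s : List Char) (c : Char) :
    ∀ k, k < s.length →
      PySem.Chars.rfind.go s [c] k =
        match ((s.take (k + 1)).reverse.findIdx? (· == c)) with
        | some j => (k : Int) - j
        | none => -1 := by
  intro k
  induction k with
  | zero =>
    intro hk
    have h0 : PySem.Chars.rfind.go s [c] 0 = if [c].isPrefixOf s then 0 else -1 := by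
      simp [PySem.Chars.rfind.go]
    rw [h0]
    obtain ⟨a, t, hs⟩ := List.exists_cons_of_ne_nil (List.ne_nil_of_length_pos hk)
    subst hs
    by_cases hac : a = c
    · subst hac
      rw [if_pos (by rw [singleton_isPrefixOf]; simp)]
      simp [List.findIdx?_cons]
    · rw [if_neg (by rw [singleton_isPrefixOf]; simp [hac])]
      have : ((a :: t).take 1).reverse = [a] := by simp [List.take_succ_cons]
      rw [this]
      simp [List.findIdx?_cons, hac]
  | succ k ih =>
    intro hk
    have hstep : PySem.Chars.rfind.go s [c] (k + 1) =
        if [c].isPrefixOf (s.drop (k + 1)) then ((k : Int) + 1) else PySem.Chars.rfind.go s [c] k := by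
      rw [PySem.Chars.rfind.go]
      norm_num
    rw [hstep, ih (by omega)]
    have hget : (s.drop (k + 1))[0]? = some s[k + 1] := by
      simp [List.getElem?_drop, List.getElem?_eq_getElem, hk]
    have htk : (s.take (k + 2)).reverse = s[k + 1] :: (s.take (k + 1)).reverse := by
      rw [List.take_succ, List.getElem?_eq_getElem hk]
      simp
    rw [htk, List.findIdx?_cons]
    by_cases hc : s[k + 1] = c
    · rw [if_pos (by rw [singleton_isPrefixOf, hget, hc])]
      simp [hc]
    · rw [if_neg (by rw [singleton_isPrefixOf, hget]; simp [hc])]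
      have hcb : (s[k + 1] == c) = false := by simpa using hc
      simp only [hcb, if_false, Bool.false_eq_true]
      cases hfi : (s.take (k + 1)).reverse.findIdx? (· == c) with
      | none => simp
      | some j =>
        simp only [Option.map_some]
        push_cast
        ring_nf

lemma rfind_single (s : List Char) (c : Char) :
    PySem.Chars.rfind s [c] =
      match s.reverse.findIdx? (· == c) with
      | some j => (s.length : Int) - 1 - j
      | none => -1 := by
  unfold PySem.Chars.rfind
  cases s with
  | nil => simp [PySem.Chars.rfind.go]
  | cons a t =>
    have hlen : (a :: t).length = t.length + 1 := rfl
    rw [hlen]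
    have hstep : PySem.Chars.rfind.go (a :: t) [c] (t.length + 1) =
        if [c].isPrefixOf ((a :: t).drop (t.length + 1)) then ((t.length : Int) + 1)
        else PySem.Chars.rfind.go (a :: t) [c] t.length := by
      rw [PySem.Chars.rfind.go]
      norm_num
    have hdrop : (a :: t).drop (t.length + 1) = [] := by
      apply List.drop_eq_nil_of_le
      simp
    rw [hstep, hdrop, if_neg (by simp)]
    rw [rfind_go_eq (a :: t) c t.length (by simp)]
    have : (a :: t).take (t.length + 1) = a :: t := List.take_of_length_le (by simp)
    rw [this]
    cases hfi : (a :: t).reverse.findIdx? (· == c) with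
    | none => simp
    | some j => simp

lemma rfindCut_eq_spec (body : List Char) :
    (if (PySem.Chars.rfind body [':'] != -1 &&
          (body.length : Int) - PySem.Chars.rfind body [':'] ≤ 6) then
        PySem.List.slice body none (some (PySem.Chars.rfind body [':']))
      else body) = portSpec body := by
  unfold portSpec
  cases hfi : body.reverse.findIdx? (· == ':') with
  | none =>
    have hr : PySem.Chars.rfind body [':'] = -1 := by rw [rfind_single, hfi]
    have hnone : (body.reverse.take 6).findIdx? (· == ':') = none := by
      rw [List.findIdx?_eq_none_iff] at hfi ⊢
      intro x hx
      exact hfi x (List.mem_of_mem_take hx)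
    simp [hr, hnone]
  | some j =>
    have hr : PySem.Chars.rfind body [':'] = (body.length : Int) - 1 - j := by
      rw [rfind_single, hfi]
    have hjl : j < body.length := by
      have := (List.findIdx?_eq_some_iff_getElem.mp hfi).fst
      simpa using this
    have htk : (body.reverse.take 6).findIdx? (· == ':') =
        if j < 6 then some j else none := by
      obtain ⟨hlt, hj, hmin⟩ := List.findIdx?_eq_some_iff_getElem.mp hfi
      by_cases h6 : j < 6
      · rw [if_pos h6]
        rw [List.findIdx?_eq_some_iff_getElem]
        refine ⟨by simpa using ⟨h6, hjl⟩, by rwa [List.getElem_take], ?_⟩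
        intro i hi
        rw [List.getElem_take]
        exact hmin i hi
      · rw [if_neg h6, List.findIdx?_eq_none_iff]
        intro x hx
        rw [List.mem_iff_getElem] at hx
        obtain ⟨i, hi, hxi⟩ := hx
        have hi6 : i < 6 := by
          have := hi
          simp at this
          omega
        have := hmin i (by omega)
        rw [List.getElem_take] at hxi
        rw [← hxi]
        simpa using this
    rw [htk, hr]
    by_cases h6 : j < 6
    · rw [if_pos h6]
      have hcond : ((((body.length : Int) - 1 - j) != -1) &&
          ((body.length : Int) - ((body.length : Int) - 1 - j) ≤ 6 : Bool)) = true := by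
        simp only [Bool.and_eq_true, bne_iff_ne, decide_eq_true_eq]
        constructor
        · omega
        · omega
      rw [if_pos (by exact hcond)]
      have he : (body.length : Int) - 1 - (j : Int) = ((body.length - (j + 1) : Nat) : Int) := by
        push_cast
        omega
      rw [he, PySem.List.slice_to_natCast]
    · rw [if_neg h6]
      rw [if_neg (by
        simp only [Bool.and_eq_true, bne_iff_ne, decide_eq_true_eq, not_and]
        intro _
        omega)]

-- ---- B-side: splitOn = splitC, and the join-of-prefix characterisation ----

lemma splitC_ne_nil (l : List Char) : splitC l ≠ [] := by
  cases l with
  | nil => simp [splitC]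
  | cons c t =>
    by_cases h : c = '/'
    · subst h; rw [splitC_slash]; simp
    · rw [splitC_cons c t h]
      cases splitC t <;> simp

lemma splitOn_go_eq (l : List Char) :
    ∀ (fuel : Nat) (cur : List Char) (acc : List (List Char)), l.length < fuel →
      PySem.Chars.splitOn.go ['/'] fuel l cur acc =
        acc.reverse ++
          (match splitC l with
           | p :: ps => (cur.reverse ++ p) :: ps
           | [] => [cur.reverse]) := by
  induction l with
  | nil =>
    intro fuel cur acc hf
    obtain ⟨f, rfl⟩ := Nat.exists_eq_succ_of_ne_zero (by omega : fuel ≠ 0)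
    simp [PySem.Chars.splitOn.go, splitC]
  | cons c t ih =>
    intro fuel cur acc hf
    obtain ⟨f, rfl⟩ := Nat.exists_eq_succ_of_ne_zero (by omega : fuel ≠ 0)
    have hstep : PySem.Chars.splitOn.go ['/'] (f + 1) (c :: t) cur acc =
        if ['/'].isPrefixOf (c :: t) then
          PySem.Chars.splitOn.go ['/'] f ((c :: t).drop 1) [] (cur.reverse :: acc)
        else PySem.Chars.splitOn.go ['/'] f t (c :: cur) acc := by
      rw [PySem.Chars.splitOn.go]
      norm_num
    rw [hstep]
    have hflen : t.length < f := by simpa using hf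
    by_cases hc : c = '/'
    · rw [if_pos (by rw [singleton_isPrefixOf]; simp [hc])]
      simp only [List.drop_succ_cons, List.drop_zero]
      rw [ih f [] (cur.reverse :: acc) hflen]
      subst hc
      rw [splitC_slash]
      cases hs : splitC t with
      | nil => exact absurd hs (splitC_ne_nil t)
      | cons p ps => simp
    · rw [if_neg (by rw [singleton_isPrefixOf]; simp [hc])]
      rw [ih f (c :: cur) acc hflen]
      rw [splitC_cons c t hc]
      cases hs : splitC t with
      | nil => exact absurd hs (splitC_ne_nil t)
      | cons p ps => simp

lemma splitOn_eq_splitC (l : List Char) : PySem.Chars.splitOn l ['/'] = splitC l := by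
  unfold PySem.Chars.splitOn
  rw [splitOn_go_eq l (l.length + 1) [] [] (by omega)]
  cases hs : splitC l with
  | nil => exact absurd hs (splitC_ne_nil l)
  | cons p ps => simp

-- join of the first n chunks equals the prefix of l up to the n-th '/'
lemma splitC_idx (l : List Char) :
    ∀ n : Nat, 1 ≤ n →
      (match idxN n l with
       | some j => n + 1 ≤ (splitC l).length ∧
           PySem.Chars.join ['/'] ((splitC l).take n) = l.take j
       | none => (splitC l).length ≤ n) := by
  induction l with
  | nil =>
    intro n hn
    simp [idxN, splitC]
    omega
  | cons c t ih =>
    intro n hn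
    by_cases hc : c = '/'
    · subst hc
      rw [splitC_slash, idxN_slash]
      by_cases h1 : n ≤ 1
      · have hn1 : n = 1 := by omega
        subst hn1
        rw [if_pos (by omega)]
        refine ⟨?_, ?_⟩
        · have h1 : 1 ≤ (splitC t).length := List.length_pos_of_ne_nil (splitC_ne_nil t)
          simp only [List.length_cons]
          omega
        · rw [show (([] : List Char) :: splitC t).take 1 = [[]] from by
            simp [List.take_succ_cons], PySem.Chars.join_singleton]
          simp
      · rw [if_neg h1]
        have iht := ih (n - 1) (by omega)
        cases hx : idxN (n - 1) t with
        | none =>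
          rw [hx] at iht
          simp only [Option.map_none, List.length_cons]
          omega
        | some j =>
          rw [hx] at iht
          obtain ⟨hlen, hjoin⟩ := iht
          simp only [Option.map_some]
          refine ⟨by simp only [List.length_cons]; omega, ?_⟩
          have htn : ([] :: splitC t).take n = [] :: (splitC t).take (n - 1) := by
            obtain ⟨k, hk⟩ := Nat.exists_eq_succ_of_ne_zero (by omega : n ≠ 0)
            subst hk
            simp
          rw [htn]
          obtain ⟨q, qs, hq⟩ : ∃ q qs, (splitC t).take (n - 1) = q :: qs := by
            have : (splitC t).take (n - 1) ≠ [] := by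
              apply List.ne_nil_of_length_pos
              rw [List.length_take]
              omega
            obtain ⟨q, qs, h⟩ := List.exists_cons_of_ne_nil this
            exact ⟨q, qs, h⟩
          rw [hq]
          have hjc : PySem.Chars.join ['/'] ([] :: q :: qs) =
              '/' :: PySem.Chars.join ['/'] (q :: qs) := by
            rw [PySem.Chars.join_cons_cons]
            simp
          rw [hjc, ← hq, hjoin]
          simp [List.take_succ_cons]
    · rw [idxN_cons n c t hc]
      have iht := ih n hn
      obtain ⟨p, ps, hs⟩ : ∃ p ps, splitC t = p :: ps :=
        List.exists_cons_of_ne_nil (splitC_ne_nil t)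
      have hsl : splitC (c :: t) = (c :: p) :: ps := by
        rw [splitC_cons c t hc, hs]
      rw [hsl]
      cases hx : idxN n t with
      | none =>
        rw [hx] at iht
        simp only [Option.map_none]
        rw [hs] at iht
        simpa using iht
      | some j =>
        rw [hx] at iht
        obtain ⟨hlen, hjoin⟩ := iht
        simp only [Option.map_some]
        rw [hs] at hlen
        refine ⟨by simpa using hlen, ?_⟩
        have htn : ((c :: p) :: ps).take n = (c :: p) :: ps.take (n - 1) := by
          obtain ⟨k, hk⟩ := Nat.exists_eq_succ_of_ne_zero (by omega : n ≠ 0)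
          subst hk
          simp
        rw [htn]
        have hpt : (p :: ps).take n = p :: ps.take (n - 1) := by
          obtain ⟨k, hk⟩ := Nat.exists_eq_succ_of_ne_zero (by omega : n ≠ 0)
          subst hk
          simp
        have hjc : PySem.Chars.join ['/'] ((c :: p) :: ps.take (n - 1)) =
            c :: PySem.Chars.join ['/'] (p :: ps.take (n - 1)) := by
          cases hps : ps.take (n - 1) with
          | nil => rw [PySem.Chars.join_singleton, PySem.Chars.join_singleton]
          | cons y ys =>
            rw [PySem.Chars.join_cons_cons, PySem.Chars.join_cons_cons]
            simp
        rw [hjc, ← hpt]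
        rw [hs, hpt] at hjoin
        rw [hpt, hjoin]
        simp [List.take_succ_cons]

-- B's slash stage equals "cut at the n-th '/' if it exists" (n ≥ 1)
lemma slashStageB (l : List Char) (n : Nat) (hn : 1 ≤ n) :
    (if (0 < (n : Int) && (n : Int) ≤ ((PySem.Chars.splitOn l ['/']).length : Int) - 1) then
        PySem.Chars.join ['/'] (PySem.List.slice (PySem.Chars.splitOn l ['/']) none (some (n : Int)))
      else l) =
      (match idxN n l with
       | some j => l.take j
       | none => l) := by
  rw [splitOn_eq_splitC, PySem.List.slice_to_natCast]
  have hidx := splitC_idx l n hn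
  cases hx : idxN n l with
  | none =>
    rw [hx] at hidx
    rw [if_neg]
    simp only [Bool.and_eq_true, decide_eq_true_eq, not_and]
    intro _
    have : ((splitC l).length : Int) ≤ n := by exact_mod_cast hidx
    omega
  | some j =>
    rw [hx] at hidx
    obtain ⟨hlen, hjoin⟩ := hidx
    rw [if_pos]
    · exact hjoin
    · simp only [Bool.and_eq_true, decide_eq_true_eq]
      constructor
      · exact_mod_cast (by omega : (0 : Int) < n)
      · have : (n : Int) + 1 ≤ ((splitC l).length : Int) := by exact_mod_cast hlen
        omega

-- the two instantiations used by the final proof, with the Int literals as they appear in the port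
lemma slashStageB3 (l : List Char) :
    (if ((0 : Int) < 3 && (3 : Int) ≤ ((PySem.Chars.splitOn l ['/']).length : Int) - 1) then
        PySem.Chars.join ['/'] (PySem.List.slice (PySem.Chars.splitOn l ['/']) none (some (3 : Int)))
      else l) =
      (match idxN 3 l with
       | some j => l.take j
       | none => l) := by
  have h := slashStageB l 3 (by omega)
  norm_num at h ⊢
  exact h

lemma slashStageB1 (l : List Char) :
    (if ((0 : Int) < 1 && (1 : Int) ≤ ((PySem.Chars.splitOn l ['/']).length : Int) - 1) then
        PySem.Chars.join ['/'] (PySem.List.slice (PySem.Chars.splitOn l ['/']) none (some (1 : Int)))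
      else l) =
      (match idxN 1 l with
       | some j => l.take j
       | none => l) := by
  have h := slashStageB l 1 (by omega)
  norm_num at h ⊢
  exact h

-- B's slash stage with n = 0 keeps l
lemma slashStageB_zero (l : List Char) (parts : List (List Char)) :
    (if ((0 : Int) < 0 && (0 : Int) ≤ ((parts).length : Int) - 1) then
        PySem.Chars.join ['/'] (PySem.List.slice parts none (some (0 : Int)))
      else l) = l := by
  norm_num

-- ---- A-side: the enumerate loop ----

lemma loopA_other (first : Char) (h1 : first ≠ 'h') (h2 : first ≠ 'w') :
    ∀ (suf : List Char) (s cnt : Int) (full : List Char),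
      stripUrlsLoopA first full (PySem.List.enumerate suf s) cnt = finishA full := by
  intro suf
  induction suf with
  | nil => intro s cnt full; simp [PySem.List.enumerate, stripUrlsLoopA]
  | cons c t ih =>
    intro s cnt full
    have b1 : (first == 'h') = false := by simpa using h1
    have b2 : (first == 'w') = false := by simpa using h2
    by_cases h : c == '/'
    · simp [PySem.List.enumerate, stripUrlsLoopA, h, b1, b2, ih]
    · simp only [Bool.not_eq_true] at h
      simp [PySem.List.enumerate, stripUrlsLoopA, h, ih]

lemma loopA_hw (first : Char) (N : Nat)
    (hN : (first = 'h' ∧ N = 3) ∨ (first = 'w' ∧ N = 1)) :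
    ∀ (suf pre : List Char) (cnt : Nat), cnt < N →
      stripUrlsLoopA first (pre ++ suf) (PySem.List.enumerate suf (pre.length : Int)) (cnt : Int) =
        (match idxN (N - cnt) suf with
         | some j => finishA ((pre ++ suf).take (pre.length + j))
         | none => finishA (pre ++ suf)) := by
  intro suf
  induction suf with
  | nil =>
    intro pre cnt hcnt
    simp [PySem.List.enumerate, stripUrlsLoopA, idxN]
  | cons c t ih =>
    intro pre cnt hcnt
    have henum : PySem.List.enumerate (c :: t) (pre.length : Int) =
        ((pre.length : Int), c) :: PySem.List.enumerate t ((pre.length : Int) + 1) := rfl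
    rw [henum]
    simp only [stripUrlsLoopA]
    by_cases hc : c = '/'
    · subst hc
      have hcond : ((first == 'h' && ((cnt : Int) + 1 == 3)) || (first == 'w' && ((cnt : Int) + 1 == 1)))
          = decide (cnt + 1 = N) := by
        rcases hN with ⟨hf, hNv⟩ | ⟨hf, hNv⟩ <;> subst hf <;> subst hNv <;>
          · cases hd : decide (cnt + 1 = _) <;> simp_all <;> omega
      simp only [show (('/' : Char) == '/') = true from by decide, if_true, hcond]
      by_cases hfin : cnt + 1 = N
      · have hNc : N - cnt = 1 := by omega
        simp only [hfin, decide_true, if_true, hNc]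
        rw [PySem.List.slice_to_natCast]
        simp [idxN]
      · have h2 : 2 ≤ N - cnt := by omega
        simp only [hfin, decide_false, if_false, Bool.false_eq_true]
        have hcast : (cnt : Int) + 1 = ((cnt + 1 : Nat) : Int) := by push_cast; ring
        have happ : pre ++ '/' :: t = (pre ++ ['/']) ++ t := by simp
        have hlen : ((pre.length : Int) + 1) = (((pre ++ ['/']).length : Int)) := by
          simp
        rw [hcast, hlen, happ, ih (pre ++ ['/']) (cnt + 1) (by omega)]
        have hidx : idxN (N - cnt) ('/' :: t) = (idxN (N - (cnt + 1)) t).map (· + 1) := by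
          have hle : ¬ (N - cnt ≤ 1) := by omega
          have hsub : N - cnt - 1 = N - (cnt + 1) := by omega
          simp [idxN, hle, hsub]
        rw [hidx]
        cases hx : idxN (N - (cnt + 1)) t with
        | none => simp
        | some j =>
          simp only [Option.map_some]
          rw [← happ]
          congr 1
          simp
          omega
    · have hcb : (c == '/') = false := by simpa using hc
      simp only [hcb, if_false, Bool.false_eq_true]
      have happ : pre ++ c :: t = (pre ++ [c]) ++ t := by simp
      have hlen : ((pre.length : Int) + 1) = (((pre ++ [c]).length : Int)) := by simp
      rw [hlen, happ, ih (pre ++ [c]) cnt hcnt]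
      have hidx : idxN (N - cnt) (c :: t) = (idxN (N - cnt) t).map (· + 1) := by
        simp [idxN, hc]
      rw [hidx]
      cases hx : idxN (N - cnt) t with
      | none => simp
      | some j =>
        simp only [Option.map_some]
        rw [← happ]
        congr 1
        simp
        omega

-- B's whole tail pipeline (after the slash stage) = finishA
lemma tailB_eq_finishA (body : List Char) :
    String.ofList (PySem.Chars.stripChars
      (if (PySem.Chars.rfind body [':'] != -1 &&
            (body.length : Int) - PySem.Chars.rfind body [':'] ≤ 6) then
          PySem.List.slice body none (some (PySem.Chars.rfind body [':']))
        else body) ['\\']) = String.ofList (finishA body) := by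
  rw [rfindCut_eq_spec, finishA, stripPortA_eq_spec]

-- ===== VERDICT (by name: the statement is the Claim_ definition above) =====
theorem strip_urls_spec : Claim_equal_strip_urls := by
  unfold Claim_equal_strip_urls Spec_strip_urls
  intro url _
  by_cases hemp : url.toList = []
  · have : url = "" := by
      cases url
      simp_all
    simp [strip_urls, strip_urls_alt, this]
  · obtain ⟨a, t, hl⟩ := List.exists_cons_of_ne_nil hemp
    have hlen0 : ¬ (PySem.Str.len url == 0) = true := by
      simp [hl]
      omega
    have hne : ¬ (url == "") = true := by
      simp only [beq_iff_eq]
      intro h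
      rw [h] at hl
      simp at hl
    have hfirst : PySem.List.pyGetD url.toList 0 ' ' = a := by
      rw [hl, PySem.List.pyGetD_zero_cons]
    simp only [strip_urls, strip_urls_alt, hlen0, hne, if_false, hfirst, Bool.false_eq_true]
    by_cases hha : a = 'h'
    · subst hha
      have hA := loopA_hw 'h' 3 (Or.inl ⟨rfl, rfl⟩) url.toList [] 0 (by omega)
      simp only [List.nil_append, List.length_nil, Nat.cast_zero, Nat.zero_add,
        Nat.sub_zero, Nat.cast_ofNat] at hA
      rw [hA]
      simp only [show (('h' : Char) == 'h') = true from by decide, if_true]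
      rw [slashStageB3 url.toList]
      cases hx : idxN 3 url.toList with
      | none => exact (tailB_eq_finishA url.toList).symm
      | some j => exact (tailB_eq_finishA (url.toList.take j)).symm
    · by_cases hwa : a = 'w'
      · subst hwa
        have hA := loopA_hw 'w' 1 (Or.inr ⟨rfl, rfl⟩) url.toList [] 0 (by omega)
        simp only [List.nil_append, List.length_nil, Nat.cast_zero, Nat.zero_add,
          Nat.sub_zero] at hA
        rw [hA]
        simp only [show (('w' : Char) == 'h') = false from by decide,
          show (('w' : Char) == 'w') = true from by decide, if_true, if_false,
          Bool.false_eq_true]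
        rw [slashStageB1 url.toList]
        cases hx : idxN 1 url.toList with
        | none => exact (tailB_eq_finishA url.toList).symm
        | some j => exact (tailB_eq_finishA (url.toList.take j)).symm
      · rw [loopA_other a hha hwa]
        have b1 : (a == 'h') = false := by simpa using hha
        have b2 : (a == 'w') = false := by simpa using hwa
        simp only [b1, b2, if_false, Bool.false_eq_true]
        rw [slashStageB_zero url.toList (PySem.Chars.splitOn url.toList ['/'])]
        exact (tailB_eq_finishA url.toList).symm
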